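-- pv_equiv track=rewrite | github.com/SanjithVenkatesh/stemme | methods/stv.py | pref_count
-- ===== SOURCE A (Python) =====
-- def pref_count(votes):
--     candidateCount = dict()
--
--     for vote in votes:
--         if len(vote) == 0:
--             continue
--         if vote[0] not in candidateCount:
--             candidateCount[vote[0]] = []
--             candidateCount[vote[0]] = [vote]
--         else:
--             candidateCount[vote[0]].append(vote)
--
--     return candidateCount
-- ===== SOURCE B (Python) =====
-- def pref_count(votes):
--     # Phase 1: collect distinct first-preference candidates in first-appearance order.
--     keys = []
--     seen = set()
--     for vote in votes:
--         if vote and vote[0] not in seen: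
--             seen.add(vote[0])
--             keys.append(vote[0])
--     # Phase 2: for each candidate, gather its votes by filtering the full list.
--     return {k: [v for v in votes if v and v[0] == k] for k in keys}
-- ===== Notes on version B (the rewrite author's own statement) =====
-- stated objective: alternative
-- what changed: Replaces the single bucketing pass that mutates per-key lists inside a dict with a two-phase gather-keys-then-filter structure: one pass collects the distinct first-preference candidates in order, then each bucket is produced by filtering the whole vote list.
import Mathlib
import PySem

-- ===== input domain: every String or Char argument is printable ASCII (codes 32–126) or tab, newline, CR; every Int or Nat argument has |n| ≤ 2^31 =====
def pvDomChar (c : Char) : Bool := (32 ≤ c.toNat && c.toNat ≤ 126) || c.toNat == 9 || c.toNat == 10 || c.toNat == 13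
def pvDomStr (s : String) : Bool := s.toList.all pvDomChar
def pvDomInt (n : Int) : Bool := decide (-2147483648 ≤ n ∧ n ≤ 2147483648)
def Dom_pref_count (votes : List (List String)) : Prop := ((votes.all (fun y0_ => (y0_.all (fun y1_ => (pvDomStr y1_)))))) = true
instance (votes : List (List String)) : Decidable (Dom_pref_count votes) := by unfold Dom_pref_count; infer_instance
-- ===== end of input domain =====

-- B replaces A's single bucketing pass (a dict of growing lists) by a two-phase
-- gather-keys-then-filter structure; same result, stated as an 'alternative' objective.

-- ===== PORT A =====
-- literal port of A: one pass over votes, a dict keyed by the first preference;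
-- absent key: two assignments (insert [] then insert [vote]); present key: append.
def pref_count (votes : List (List String)) : List (String × List (List String)) :=
  (votes.foldl (fun d vote =>
      match vote with
      | [] => d
      | v0 :: tl =>
        if d.contains v0 = false then
          (d.insert v0 []).insert v0 [v0 :: tl]
        else
          d.modify v0 [] (fun l => l ++ [v0 :: tl]))
    PySem.Dict.empty).items

-- ===== PORT B =====
-- literal port of B: phase 1 collects the distinct first preferences in order
-- (the Python's seen-set + keys-list pair IS an ordered set: PySem.Set);
-- phase 2 builds each bucket by filtering the whole vote list.
def pref_count_alt (votes : List (List String)) : List (String × List (List String)) :=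
  let keys : PySem.Set String := votes.foldl (fun ks vote =>
      match vote with
      | [] => ks
      | v0 :: _ => PySem.Set.add ks v0) PySem.Set.empty
  keys.map (fun k => (k, votes.filter (fun v =>
      match v with
      | [] => false
      | x :: _ => x == k)))

-- ===== PRECONDITION & SPEC =====
def Spec_pref_count (votes : List (List String)) (out : List (String × List (List String))) : Prop := out = pref_count_alt votes
instance (votes : List (List String)) (out : List (String × List (List String))) : Decidable (Spec_pref_count votes out) := by unfold Spec_pref_count; infer_instance

-- ===== CLAIM (what is proved, stated in full; the proofs are below) =====
def Claim_equal_pref_count : Prop := ∀ (votes : List (List String)), Dom_pref_count votes → Spec_pref_count votes (pref_count votes)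

-- ===== LEMMAS AND PROOFS =====

-- A's loop body, named for the proofs
def pvStepA (d : PySem.Dict String (List (List String))) (vote : List String) :
    PySem.Dict String (List (List String)) :=
  match vote with
  | [] => d
  | v0 :: tl =>
    if d.contains v0 = false then
      (d.insert v0 []).insert v0 [v0 :: tl]
    else
      d.modify v0 [] (fun l => l ++ [v0 :: tl])

-- the uniform modify step A's body is pointwise equal to
def pvStepM (d : PySem.Dict String (List (List String))) (vote : List String) :
    PySem.Dict String (List (List String)) :=
  match vote with
  | [] => d
  | v0 :: tl => d.modify v0 [] (fun l => l ++ [v0 :: tl])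

-- B's key-collecting step
def pvStepK (ks : PySem.Set String) (vote : List String) : PySem.Set String :=
  match vote with
  | [] => ks
  | v0 :: _ => PySem.Set.add ks v0

theorem pvStepA_eq_pvStepM (d : PySem.Dict String (List (List String))) (vote : List String) :
    pvStepA d vote = pvStepM d vote := by
  cases vote with
  | nil => rfl
  | cons v0 tl =>
    simp only [pvStepA, pvStepM]
    by_cases h : d.contains v0 = false
    · simp only [h, if_true]
      rw [PySem.Dict.insert_insert_self]
      simp [PySem.Dict.modify, PySem.Dict.insert, h,
        PySem.Dict.getD_of_not_contains d ([] : List (List String)) h]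
    · simp [h]

theorem pref_count_eq_foldM (votes : List (List String)) :
    pref_count votes = (votes.foldl pvStepM PySem.Dict.empty).items := by
  have h : pvStepA = pvStepM := funext fun d => funext fun v => pvStepA_eq_pvStepM d v
  unfold pref_count
  show (votes.foldl pvStepA PySem.Dict.empty).items = _
  rw [h]

theorem pv_getD_foldM (votes : List (List String)) (d : PySem.Dict String (List (List String)))
    (c : String) :
    (votes.foldl pvStepM d).getD c [] =
      d.getD c [] ++ votes.filter (fun v =>
        match v with
        | [] => false
        | x :: _ => x == c) := by
  induction votes generalizing d with
  | nil => simp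
  | cons v tl ih =>
    cases v with
    | nil => simpa using ih d
    | cons v0 t =>
      simp only [List.foldl_cons, List.filter_cons, pvStepM]
      rw [ih]
      rw [PySem.Dict.getD_modify]
      by_cases h : c = v0
      · subst h; simp
      · simp [h, beq_eq_false_iff_ne.mpr (fun he => h he.symm)]

theorem pv_keys_foldM (votes : List (List String)) (d : PySem.Dict String (List (List String))) :
    (votes.foldl pvStepM d).keys = votes.foldl pvStepK d.keys := by
  induction votes generalizing d with
  | nil => rfl
  | cons v tl ih =>
    cases v with
    | nil => simpa using ih d
    | cons v0 t =>
      simp only [List.foldl_cons, pvStepM, pvStepK]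
      rw [ih]
      congr 1
      rw [PySem.Dict.keys_modify]
      by_cases h : d.contains v0 = true
      · rw [PySem.Dict.keys_insert_of_contains d _ h,
          PySem.Set.add_of_mem ((PySem.Dict.contains_iff_mem_keys d v0).mp h)]
      · have h' : d.contains v0 = false := by simpa using h
        rw [PySem.Dict.keys_insert_of_not_contains d _ h',
          PySem.Set.add_of_not_mem (fun hm => h ((PySem.Dict.contains_iff_mem_keys d v0).mpr hm))]

theorem pv_nodup_foldK (votes : List (List String)) (ks : PySem.Set String) (h : ks.Nodup) :
    (votes.foldl pvStepK ks).Nodup := by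
  induction votes generalizing ks with
  | nil => exact h
  | cons v tl ih =>
    cases v with
    | nil => exact ih ks h
    | cons v0 t => exact ih _ (PySem.Set.nodup_add ks v0 h)

-- ===== VERDICT (by name: the statement is the Claim_ definition above) =====
theorem pref_count_spec : Claim_equal_pref_count := by
  intro votes _
  unfold Spec_pref_count pref_count_alt
  rw [pref_count_eq_foldM]
  have hk : (votes.foldl pvStepM PySem.Dict.empty).keys = votes.foldl pvStepK [] := by
    simpa [PySem.Dict.keys_empty] using pv_keys_foldM votes PySem.Dict.empty
  have hnd : (votes.foldl pvStepM PySem.Dict.empty).keys.Nodup := by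
    rw [hk]; exact pv_nodup_foldK votes [] List.nodup_nil
  rw [PySem.Dict.items_eq_map_keys _ hnd ([] : List (List String)), hk]
  show List.map _ (votes.foldl pvStepK PySem.Set.empty) =
    List.map _ (votes.foldl (fun ks vote =>
      match vote with
      | [] => ks
      | v0 :: _ => PySem.Set.add ks v0) PySem.Set.empty)
  have hstep : (fun (ks : PySem.Set String) (vote : List String) =>
      match vote with
      | [] => ks
      | v0 :: _ => PySem.Set.add ks v0) = pvStepK := rfl
  rw [hstep]
  apply List.map_congr_left
  intro k _
  rw [pv_getD_foldM votes PySem.Dict.empty k, PySem.Dict.getD_empty]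
  simp
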